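-- pv_equiv track=rewrite | github.com/cdxw46/challenges | smurf/sip/auth.py | _parse_digest_params
-- ===== SOURCE A (Python) =====
-- def _parse_digest_params(s: str) -> dict[str, str]:
--     """Parse comma-separated ``key=value`` pairs honouring quoted strings.
--
--     Used to read both Authorization request headers and WWW-Authenticate
--     challenges; quoted values may contain commas, colons, equals and so on.
--     """
--
--     out: dict[str, str] = {}
--     i = 0
--     n = len(s)
--     while i < n:
--         while i < n and s[i] in " \t,":
--             i += 1
--         # key
--         start = i
--         while i < n and s[i] not in "= \t":
--             i += 1
--         key = s[start:i].lower()
--         if not key: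
--             break
--         while i < n and s[i] in " \t":
--             i += 1
--         if i >= n or s[i] != "=":
--             out[key] = ""
--             continue
--         i += 1
--         while i < n and s[i] in " \t":
--             i += 1
--         if i < n and s[i] == '"':
--             i += 1
--             buf: list[str] = []
--             while i < n and s[i] != '"':
--                 if s[i] == "\\" and i + 1 < n:
--                     buf.append(s[i + 1])
--                     i += 2
--                 else:
--                     buf.append(s[i])
--                     i += 1
--             if i < n:
--                 i += 1  # skip closing quote
--             out[key] = "".join(buf)
--         else:
--             start = i
--             while i < n and s[i] not in ", \t":
--                 i += 1
--             out[key] = s[start:i]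
--     return out
-- ===== SOURCE B (Python) =====
-- def _parse_digest_params(s: str) -> dict[str, str]:
--     """Single forward scan with an explicit parser state machine."""
--     out: dict[str, str] = {}
--     SKIP, KEY, AWAIT_EQ, AWAIT_VAL, BARE, QUOTED, ESCAPED, HALT = range(8)
--     state = SKIP
--     key: list[str] = []
--     buf: list[str] = []
--
--     def emit(value: str) -> None:
--         out["".join(key).lower()] = value
--
--     for c in s:
--         if state == HALT:
--             pass
--         elif state == SKIP:
--             if c in " \t,":
--                 pass
--             elif c == "=":
--                 state = HALT  # empty key: original parser stops here
--             else:
--                 key = [c]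
--                 state = KEY
--         elif state == KEY:
--             if c == "=":
--                 state = AWAIT_VAL
--             elif c in " \t":
--                 state = AWAIT_EQ
--             else:
--                 key.append(c)
--         elif state == AWAIT_EQ:
--             if c in " \t":
--                 pass
--             elif c == "=":
--                 state = AWAIT_VAL
--             else:
--                 emit("")
--                 if c == ",":
--                     state = SKIP
--                 else:
--                     key = [c]
--                     state = KEY
--         elif state == AWAIT_VAL:
--             if c in " \t":
--                 pass
--             elif c == '"':
--                 buf = []
--                 state = QUOTED
--             elif c == ",":
--                 emit("")
--                 state = SKIP
--             else:
--                 buf = [c]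
--                 state = BARE
--         elif state == BARE:
--             if c in ", \t":
--                 emit("".join(buf))
--                 state = SKIP
--             else:
--                 buf.append(c)
--         elif state == QUOTED:
--             if c == '"':
--                 emit("".join(buf))
--                 state = SKIP
--             elif c == "\\":
--                 state = ESCAPED
--             else:
--                 buf.append(c)
--         else:  # ESCAPED
--             buf.append(c)
--             state = QUOTED
--
--     # flush at end of input
--     if state in (KEY, AWAIT_EQ, AWAIT_VAL):
--         emit("")
--     elif state == BARE or state == QUOTED:
--         emit("".join(buf))
--     elif state == ESCAPED:
--         emit("".join(buf) + "\\")
--     return out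
-- ===== Notes on version B (the rewrite author's own statement) =====
-- stated objective: alternative
-- what changed: Replaced the index-driven parser made of nested while loops and slicing with a single forward character scan driven by an explicit state machine (skip/key/await-eq/await-val/bare/quoted/escaped/halt) with an end-of-input flush.
import Mathlib
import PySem

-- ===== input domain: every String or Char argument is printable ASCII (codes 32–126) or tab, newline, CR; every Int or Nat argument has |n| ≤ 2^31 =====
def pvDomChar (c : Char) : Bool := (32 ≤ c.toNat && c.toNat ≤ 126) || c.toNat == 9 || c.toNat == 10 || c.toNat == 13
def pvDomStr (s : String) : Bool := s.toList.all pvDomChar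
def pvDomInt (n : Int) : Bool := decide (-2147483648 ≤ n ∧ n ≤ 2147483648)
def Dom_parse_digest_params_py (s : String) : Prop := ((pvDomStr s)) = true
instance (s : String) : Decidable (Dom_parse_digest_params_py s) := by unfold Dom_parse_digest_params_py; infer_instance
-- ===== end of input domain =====

-- B rewrites A's index-based nested while loops as one forward scan driven by an explicit
-- state machine; same O(n) cost, different decomposition. Return values agree on all strings.

-- ===== PORT A =====
-- Character classes used by A's while-loop conditions
def pvIsSep (c : Char) : Bool := c == ' ' || c == '\t' || c == ','       -- s[i] in " \t,"
def pvIsWS (c : Char) : Bool := c == ' ' || c == '\t'                    -- s[i] in " \t"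
def pvKeyStop (c : Char) : Bool := c == '=' || c == ' ' || c == '\t'     -- s[i] in "= \t"
def pvBareStop (c : Char) : Bool := c == ',' || c == ' ' || c == '\t'    -- s[i] in ", \t"

-- while i < n and s[i] in " \t,": i += 1
def aSkipSeps : List Char → List Char
  | [] => []
  | c :: t => if pvIsSep c then aSkipSeps t else c :: t

-- while i < n and s[i] not in "= \t": i += 1  (returns the slice s[start:i] and the rest)
def aKey : List Char → List Char × List Char
  | [] => ([], [])
  | c :: t => if pvKeyStop c then ([], c :: t)
              else let p := aKey t; (c :: p.1, p.2)

-- while i < n and s[i] in " \t": i += 1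
def aSkipWS : List Char → List Char
  | [] => []
  | c :: t => if pvIsWS c then aSkipWS t else c :: t

-- quoted-value loop: while i < n and s[i] != '"': … ; then skip the closing quote
def aQuoted : List Char → List Char × List Char
  | [] => ([], [])
  | c :: t =>
    if c == '"' then ([], t)
    else if c == '\\' then
      match t with
      | c2 :: t2 => let p := aQuoted t2; (c2 :: p.1, p.2)   -- i + 1 < n: append s[i+1], i += 2
      | [] => let p := aQuoted ([] : List Char); (c :: p.1, p.2)  -- trailing backslash: append s[i], i += 1
    else let p := aQuoted t; (c :: p.1, p.2)

-- bareword value: while i < n and s[i] not in ", \t": i += 1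
def aBare : List Char → List Char × List Char
  | [] => ([], [])
  | c :: t => if pvBareStop c then ([], c :: t)
              else let p := aBare t; (c :: p.1, p.2)

-- termination lemmas for the outer while loop
theorem aSkipSeps_length_le (l : List Char) : (aSkipSeps l).length ≤ l.length := by
  induction l with
  | nil => simp [aSkipSeps]
  | cons c t ih => simp only [aSkipSeps]; split; · simp; omega
                   · simp

theorem aSkipWS_length_le (l : List Char) : (aSkipWS l).length ≤ l.length := by
  induction l with
  | nil => simp [aSkipWS]
  | cons c t ih => simp only [aSkipWS]; split; · simp; omega
                   · simp

theorem aKey_length (l : List Char) : (aKey l).1.length + (aKey l).2.length = l.length := by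
  induction l with
  | nil => simp [aKey]
  | cons c t ih => simp only [aKey]; split; · simp
                   · simp; omega

theorem aQuoted_nil : aQuoted [] = ([], []) := by rw [aQuoted.eq_def]

theorem aQuoted_quote (t : List Char) : aQuoted ('"'::t) = ([], t) := by
  rw [aQuoted.eq_def]; simp

theorem aQuoted_esc1 : aQuoted ['\\'] = (['\\'], []) := by
  rw [aQuoted.eq_def]; simp [aQuoted_nil]

theorem aQuoted_esc (c2 : Char) (t2 : List Char) :
    aQuoted ('\\'::c2::t2) = (c2 :: (aQuoted t2).1, (aQuoted t2).2) := by
  rw [aQuoted.eq_def]; simp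

theorem aQuoted_other {c : Char} (h1 : c ≠ '"') (h2 : c ≠ '\\') (t : List Char) :
    aQuoted (c::t) = (c :: (aQuoted t).1, (aQuoted t).2) := by
  rw [aQuoted.eq_def]; simp [h1, h2]

theorem aQuoted_length_le : ∀ (l : List Char), (aQuoted l).2.length ≤ l.length := by
  intro l
  induction hn : l.length using Nat.strong_induction_on generalizing l with
  | _ n ih =>
    match l with
    | [] => simp [aQuoted_nil]
    | c :: t =>
      by_cases hq : c = '"'
      · subst hq
        rw [aQuoted_quote]
        simp only [List.length_cons] at hn
        simp only [List.length_nil]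
        omega
      · by_cases hb : c = '\\'
        · subst hb
          match t with
          | [] => rw [aQuoted_esc1]; simp
          | c2 :: t2 =>
            have := ih t2.length (by simp at hn; omega) t2 rfl
            rw [aQuoted_esc]
            simp only [List.length_cons] at hn
            simp only []
            omega
        · have := ih t.length (by simp at hn; omega) t rfl
          rw [aQuoted_other hq hb]
          simp only [List.length_cons] at hn
          simp only []
          omega

theorem aBare_length_le (l : List Char) : (aBare l).2.length ≤ l.length := by
  induction l with
  | nil => simp [aBare]
  | cons c t ih => simp only [aBare]; split; · simp
                   · simp; omega

-- the outer 'while i < n' loop of A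
def aLoop (d : PySem.Dict String String) (l : List Char) : PySem.Dict String String :=
  let l1 := aSkipSeps l
  let kp := aKey l1
  if hk : kp.1 = [] then d
  else
    let key := String.mk (PySem.Chars.lower kp.1)
    let l3 := aSkipWS kp.2
    if h3 : l3.head? = some '=' then       -- 'if i >= n or s[i] != "=" : out[key] = ""; continue' (negated)
      let l4 := aSkipWS l3.tail
      if h4 : l4.head? = some '"' then     -- 'if i < n and s[i] == '"'
        let bp := aQuoted l4.tail
        aLoop (d.insert key (String.mk bp.1)) bp.2
      else
        let vp := aBare l4
        aLoop (d.insert key (String.mk vp.1)) vp.2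
    else aLoop (d.insert key "") l3
termination_by l.length
decreasing_by
  · have h1 := aSkipSeps_length_le l
    have h2 := aKey_length (aSkipSeps l)
    have h3' := aSkipWS_length_le kp.2
    have h4' := aSkipWS_length_le l3.tail
    have h5 := aQuoted_length_le l4.tail
    have hk1 : kp.1.length ≥ 1 := List.length_pos_of_ne_nil hk
    have hl3 : l3 ≠ [] := by intro h; rw [h] at h3; simp at h3
    have hl3' : l3.tail.length + 1 = l3.length := by
      cases hc : l3 with | nil => exact absurd hc hl3 | cons a b => simp
    have hl4 : l4 ≠ [] := by intro h; rw [h] at h4; simp at h4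
    have hl4' : l4.tail.length + 1 = l4.length := by
      cases hc : l4 with | nil => exact absurd hc hl4 | cons a b => simp
    simp only [kp, l1, l3, l4] at *; omega
  · have h1 := aSkipSeps_length_le l
    have h2 := aKey_length (aSkipSeps l)
    have h3' := aSkipWS_length_le kp.2
    have h4' := aSkipWS_length_le l3.tail
    have h5 := aBare_length_le l4
    have hk1 : kp.1.length ≥ 1 := List.length_pos_of_ne_nil hk
    have hl3 : l3 ≠ [] := by intro h; rw [h] at h3; simp at h3
    have hl3' : l3.tail.length + 1 = l3.length := by
      cases hc : l3 with | nil => exact absurd hc hl3 | cons a b => simp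
    simp only [kp, l1, l3, l4] at *; omega
  · have h1 := aSkipSeps_length_le l
    have h2 := aKey_length (aSkipSeps l)
    have h3' := aSkipWS_length_le kp.2
    have hk1 : kp.1.length ≥ 1 := List.length_pos_of_ne_nil hk
    simp only [kp, l1, l3] at *; omega

def parse_digest_params_py (s : String) : List (String × String) :=
  (aLoop PySem.Dict.empty s.toList).items

-- ===== PORT B =====
-- parser states of the single forward scan
inductive BState where
  | skip : BState
  | halt : BState
  | key (k : List Char) : BState
  | awaitEq (k : List Char) : BState
  | awaitVal (k : List Char) : BState
  | bare (k buf : List Char) : BState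
  | quoted (k buf : List Char) : BState
  | escaped (k buf : List Char) : BState
deriving Repr, DecidableEq

-- out[key.lower()] = value
def bEmit (d : PySem.Dict String String) (k v : List Char) : PySem.Dict String String :=
  d.insert (String.mk (PySem.Chars.lower k)) (String.mk v)

def bStep (d : PySem.Dict String String) (st : BState) (c : Char) :
    PySem.Dict String String × BState :=
  match st with
  | .halt => (d, .halt)
  | .skip =>
    if pvIsSep c then (d, .skip)
    else if c == '=' then (d, .halt)       -- empty key: the original parser stops here
    else (d, .key [c])
  | .key k =>
    if c == '=' then (d, .awaitVal k)
    else if pvIsWS c then (d, .awaitEq k)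
    else (d, .key (k ++ [c]))
  | .awaitEq k =>
    if pvIsWS c then (d, .awaitEq k)
    else if c == '=' then (d, .awaitVal k)
    else if c == ',' then (bEmit d k [], .skip)
    else (bEmit d k [], .key [c])
  | .awaitVal k =>
    if pvIsWS c then (d, .awaitVal k)
    else if c == '"' then (d, .quoted k [])
    else if c == ',' then (bEmit d k [], .skip)
    else (d, .bare k [c])
  | .bare k buf =>
    if pvBareStop c then (bEmit d k buf, .skip)
    else (d, .bare k (buf ++ [c]))
  | .quoted k buf =>
    if c == '"' then (bEmit d k buf, .skip)
    else if c == '\\' then (d, .escaped k buf)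
    else (d, .quoted k (buf ++ [c]))
  | .escaped k buf => (d, .quoted k (buf ++ [c]))

-- end-of-input flush
def bFlush (d : PySem.Dict String String) (st : BState) : PySem.Dict String String :=
  match st with
  | .skip => d
  | .halt => d
  | .key k => bEmit d k []
  | .awaitEq k => bEmit d k []
  | .awaitVal k => bEmit d k []
  | .bare k buf => bEmit d k buf
  | .quoted k buf => bEmit d k buf
  | .escaped k buf => bEmit d k (buf ++ ['\\'])

def bRun (d : PySem.Dict String String) (st : BState) : List Char → PySem.Dict String String
  | [] => bFlush d st
  | c :: t => let p := bStep d st c; bRun p.1 p.2 t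

def parse_digest_params_py_alt (s : String) : List (String × String) :=
  (bRun PySem.Dict.empty .skip s.toList).items

-- ===== PRECONDITION & SPEC =====
def Spec_parse_digest_params_py (s : String) (out : List (String × String)) : Prop := out = parse_digest_params_py_alt s
instance (s : String) (out : List (String × String)) : Decidable (Spec_parse_digest_params_py s out) := by unfold Spec_parse_digest_params_py; infer_instance

-- ===== CLAIM (what is proved, stated in full; the proofs are below) =====
def Claim_equal_parse_digest_params_py : Prop := ∀ (s : String), Dom_parse_digest_params_py s → Spec_parse_digest_params_py s (parse_digest_params_py s)

-- ===== LEMMAS AND PROOFS =====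

-- A resumed just after '=' (skip WS, quoted or bare value)
def aAfterEq (d : PySem.Dict String String) (k : List Char) (l : List Char) :
    PySem.Dict String String :=
  let key := String.mk (PySem.Chars.lower k)
  let l4 := aSkipWS l
  if l4.head? = some '"' then
    let bp := aQuoted l4.tail
    aLoop (d.insert key (String.mk bp.1)) bp.2
  else
    let vp := aBare l4
    aLoop (d.insert key (String.mk vp.1)) vp.2

-- A resumed just after the key was read (skip WS, test '=', value)
def aAfterKey (d : PySem.Dict String String) (k : List Char) (l : List Char) :
    PySem.Dict String String :=
  let l3 := aSkipWS l
  if l3.head? = some '=' then aAfterEq d k l3.tail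
  else aLoop (d.insert (String.mk (PySem.Chars.lower k)) "") l3

theorem aLoop_eq (d : PySem.Dict String String) (l : List Char) :
    aLoop d l = (let kp := aKey (aSkipSeps l);
                 if kp.1 = [] then d else aAfterKey d kp.1 kp.2) := by
  rw [aLoop]
  simp only [aAfterKey, aAfterEq, dite_eq_ite]

theorem bRun_halt (l : List Char) (d : PySem.Dict String String) : bRun d .halt l = d := by
  induction l with
  | nil => rfl
  | cons c t ih => simpa [bRun, bStep] using ih

theorem aLoop_nil (d : PySem.Dict String String) : aLoop d [] = d := by
  rw [aLoop_eq]; rfl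

theorem aLoop_sep {c : Char} (h : pvIsSep c = true) (d : PySem.Dict String String)
    (t : List Char) : aLoop d (c :: t) = aLoop d t := by
  rw [aLoop_eq, aLoop_eq]
  simp only [aSkipSeps, h, if_pos]

theorem aLoop_break (d : PySem.Dict String String) (t : List Char) :
    aLoop d ('=' :: t) = d := by
  rw [aLoop_eq]
  simp [aSkipSeps, pvIsSep, aKey, pvKeyStop]

theorem aLoop_cons_key {c : Char} (hs : pvIsSep c = false) (he : c ≠ '=')
    (d : PySem.Dict String String) (t : List Char) :
    aLoop d (c :: t) = aAfterKey d (c :: (aKey t).1) (aKey t).2 := by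
  have hks : pvKeyStop c = false := by
    simp only [pvIsSep, Bool.or_eq_false_iff, beq_eq_false_iff_ne] at hs
    simp [pvKeyStop, hs.1.1, hs.1.2, he]
  rw [aLoop_eq]
  simp [aSkipSeps, hs, aKey, hks]

theorem aAfterKey_ws {c : Char} (h : pvIsWS c = true) (d : PySem.Dict String String)
    (k t : List Char) : aAfterKey d k (c :: t) = aAfterKey d k t := by
  simp only [aAfterKey, aSkipWS, h, if_pos]

theorem aAfterEq_ws {c : Char} (h : pvIsWS c = true) (d : PySem.Dict String String)
    (k t : List Char) : aAfterEq d k (c :: t) = aAfterEq d k t := by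
  simp only [aAfterEq, aSkipWS, h, if_pos]

-- the six coupled invariants, one per live parser state
def pvInv (l : List Char) : Prop :=
  (∀ d, bRun d .skip l = aLoop d l) ∧
  (∀ d k, bRun d (.key k) l = aAfterKey d (k ++ (aKey l).1) (aKey l).2) ∧
  (∀ d k, bRun d (.awaitEq k) l = aAfterKey d k l) ∧
  (∀ d k, bRun d (.awaitVal k) l = aAfterEq d k l) ∧
  (∀ d k buf, bRun d (.bare k buf) l =
      aLoop (d.insert (String.mk (PySem.Chars.lower k)) (String.mk (buf ++ (aBare l).1))) (aBare l).2) ∧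
  (∀ d k buf, bRun d (.quoted k buf) l =
      aLoop (d.insert (String.mk (PySem.Chars.lower k)) (String.mk (buf ++ (aQuoted l).1))) (aQuoted l).2)

theorem pvInv_all : ∀ n l, List.length l ≤ n → pvInv l := by
  intro n
  induction n with
  | zero =>
    intro l hl
    have : l = [] := List.eq_nil_of_length_eq_zero (Nat.le_zero.mp hl)
    subst this
    refine ⟨fun d => ?_, fun d k => ?_, fun d k => ?_, fun d k => ?_,
           fun d k buf => ?_, fun d k buf => ?_⟩ <;>
      simp [bRun, bFlush, bEmit, aKey, aBare, aAfterKey, aAfterEq, aSkipWS,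
            aLoop_nil, aQuoted_nil] <;> rfl
  | succ n ih =>
    intro l hl
    match l with
    | [] => exact ih [] (by simp)
    | c :: t =>
      have ht : t.length ≤ n := by simpa using hl
      obtain ⟨ihS, ihK, ihAE, ihAV, ihB, ihQ⟩ := ih t ht
      refine ⟨fun d => ?_, fun d k => ?_, fun d k => ?_, fun d k => ?_,
             fun d k buf => ?_, fun d k buf => ?_⟩
      · -- skip
        by_cases hs : pvIsSep c = true
        · rw [bRun]; simp only [bStep, hs, if_pos]
          rw [ihS, aLoop_sep hs]
        · by_cases he : c = '='
          · subst he
            rw [bRun]; simp [bStep, hs]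
            rw [bRun_halt, aLoop_break]
          · rw [bRun]; simp only [bStep, hs]
            have : (c == '=') = false := by simpa using he
            simp only [this, if_neg, Bool.false_eq_true, not_false_eq_true]
            rw [ihK, aLoop_cons_key (by simpa using hs) he]
            rfl
      · -- key
        by_cases he : c = '='
        · subst he
          rw [bRun]
          simp only [bStep]
          rw [if_pos (by decide)]
          rw [ihAV]
          simp [aKey, pvKeyStop, aAfterKey, aSkipWS, pvIsWS]
        · by_cases hw : pvIsWS c = true
          · rw [bRun]; simp only [bStep]
            have : (c == '=') = false := by simpa using he
            simp only [this, Bool.false_eq_true, if_neg, not_false_eq_true, hw, if_pos]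
            rw [ihAE]
            have hks : pvKeyStop c = true := by
              simp [pvIsWS] at hw; rcases hw with h | h <;> simp [pvKeyStop, h]
            simp only [aKey, hks, if_pos]
            rw [aAfterKey_ws hw]
            simp
          · rw [bRun]; simp only [bStep]
            have h1 : (c == '=') = false := by simpa using he
            simp only [h1, Bool.false_eq_true, if_neg, not_false_eq_true, hw]
            rw [ihK]
            have hks : pvKeyStop c = false := by
              simp [pvIsWS] at hw; simp [pvKeyStop, he, hw.1, hw.2]
            simp only [aKey, hks, Bool.false_eq_true, if_neg, not_false_eq_true]
            simp only [List.append_assoc, List.singleton_append]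
      · -- awaitEq
        by_cases hw : pvIsWS c = true
        · rw [bRun]; simp only [bStep, hw, if_pos]
          rw [ihAE, aAfterKey_ws hw]
        · by_cases he : c = '='
          · subst he
            rw [bRun]
            simp only [bStep]
            rw [if_neg (by decide), if_pos (by decide)]
            rw [ihAV]
            have h0 : pvIsWS '=' = false := by decide
            simp only [aAfterKey, aSkipWS, h0, Bool.false_eq_true, if_neg,
              not_false_eq_true, List.head?_cons, List.tail_cons, if_pos]
          · by_cases hc : c = ','
            · subst hc
              rw [bRun]
              simp only [bStep]
              rw [if_neg (by decide), if_neg (by decide), if_pos (by decide)]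
              rw [ihS]
              have h1 : pvIsWS ',' = false := by decide
              simp only [aAfterKey, aSkipWS, h1, Bool.false_eq_true, if_neg,
                not_false_eq_true, List.head?_cons]
              rw [if_neg (by simp)]
              rw [aLoop_sep (by decide)]
              rfl
            · rw [bRun]; simp only [bStep, hw]
              have h1 : (c == '=') = false := by simpa using he
              have h2 : (c == ',') = false := by simpa using hc
              simp only [h1, h2, Bool.false_eq_true, if_neg, not_false_eq_true]
              rw [ihK]
              have hwn : pvIsWS c = false := by simpa using hw
              have hsn : pvIsSep c = false := by
                simp [pvIsWS] at hwn; simp [pvIsSep, hwn.1, hwn.2, hc]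
              have h3 : aSkipWS (c :: t) = c :: t := by
                simp [aSkipWS, hwn]
              conv_rhs => rw [aAfterKey]
              simp only [h3, List.head?_cons]
              have h4 : (some c = some '=') = False := by simp [he]
              rw [if_neg (by simp [he])]
              rw [aLoop_cons_key hsn he]
              rfl
      · -- awaitVal
        by_cases hw : pvIsWS c = true
        · rw [bRun]; simp only [bStep, hw, if_pos]
          rw [ihAV, aAfterEq_ws hw]
        · have hwn : pvIsWS c = false := by simpa using hw
          by_cases hq : c = '"'
          · subst hq
            rw [bRun]
            simp only [bStep]
            rw [if_neg (by decide), if_pos (by decide)]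
            rw [ihQ]
            have h0 : pvIsWS '"' = false := by decide
            simp only [aAfterEq, aSkipWS, h0, Bool.false_eq_true, if_neg,
              not_false_eq_true, List.head?_cons, List.tail_cons, if_pos,
              List.nil_append]
          · by_cases hc : c = ','
            · subst hc
              rw [bRun]
              simp only [bStep]
              rw [if_neg (by decide), if_neg (by decide), if_pos (by decide)]
              rw [ihS]
              have h1 : pvIsWS ',' = false := by decide
              simp only [aAfterEq, aSkipWS, h1, Bool.false_eq_true, if_neg,
                not_false_eq_true, List.head?_cons]
              rw [if_neg (by simp)]
              simp only [aBare, pvBareStop]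
              rw [if_pos (by decide)]
              rw [aLoop_sep (by decide)]
              rfl
            · rw [bRun]; simp only [bStep, hw]
              have h1 : (c == '"') = false := by simpa using hq
              have h2 : (c == ',') = false := by simpa using hc
              simp only [h1, h2, Bool.false_eq_true, if_neg, not_false_eq_true]
              rw [ihB]
              have h3 : aSkipWS (c :: t) = c :: t := by simp [aSkipWS, hwn]
              have hbs : pvBareStop c = false := by
                simp [pvIsWS] at hwn; simp [pvBareStop, hc, hwn.1, hwn.2]
              conv_rhs => rw [aAfterEq]
              simp only [h3, List.head?_cons]
              rw [if_neg (by simp [hq])]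
              simp only [aBare, hbs, Bool.false_eq_true, if_neg, not_false_eq_true]
              simp [List.singleton_append]
      · -- bare
        by_cases hb : pvBareStop c = true
        · rw [bRun]; simp only [bStep, hb, if_pos]
          rw [ihS]
          simp only [aBare, hb, if_pos, List.append_nil]
          have hs : pvIsSep c = true := by
            simp [pvBareStop] at hb; simp [pvIsSep]; tauto
          rw [aLoop_sep hs]
          simp only [bEmit]
        · rw [bRun]; simp only [bStep, hb, Bool.false_eq_true, if_neg, not_false_eq_true]
          rw [ihB]
          simp only [aBare, hb, Bool.false_eq_true, if_neg, not_false_eq_true]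
          simp [List.append_assoc]
      · -- quoted
        by_cases hq : c = '"'
        · subst hq
          rw [bRun]
          simp only [bStep]
          rw [if_pos (by decide)]
          rw [ihS]
          rw [aQuoted_quote]
          simp [bEmit]
        · by_cases hbs : c = '\\'
          · subst hbs
            match t with
            | [] =>
              rw [bRun]
              simp only [bStep]
              rw [if_neg (by decide), if_pos (by decide)]
              rw [bRun]
              rw [aQuoted_esc1]
              simp [bFlush, aLoop_nil, bEmit]
            | c2 :: t2 =>
              have ht2 : t2.length ≤ n := by simp at hl; omega
              obtain ⟨_, _, _, _, _, ihQ2⟩ := ih t2 ht2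
              rw [bRun]
              simp only [bStep]
              rw [if_neg (by decide), if_pos (by decide)]
              rw [bRun]
              simp only [bStep]
              rw [ihQ2]
              rw [aQuoted_esc]
              simp [bEmit, List.append_assoc]
          · rw [bRun]; simp only [bStep]
            have h1 : (c == '"') = false := by simpa using hq
            have h2 : (c == '\\') = false := by simpa using hbs
            simp only [h1, h2, Bool.false_eq_true, if_neg, not_false_eq_true]
            rw [ihQ]
            rw [aQuoted_other hq hbs]
            simp [List.append_assoc]

-- ===== VERDICT (by name: the statement is the Claim_ definition above) =====
theorem parse_digest_params_py_spec : Claim_equal_parse_digest_params_py := by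
  intro s _
  unfold Spec_parse_digest_params_py parse_digest_params_py parse_digest_params_py_alt
  have h := (pvInv_all s.toList.length s.toList le_rfl).1 PySem.Dict.empty
  rw [h]
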